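-- pv_equiv track=rewrite | github.com/kwonjuyeong/Baekjoon_CodingTest | 프로그래머스/unrated/181855. 문자열 묶기/문자열 묶기.py | solution
-- ===== SOURCE A (Python) =====
-- def solution(strArr):
--     # 길이별 그룹을 저장할 딕셔너리
--     length_groups = {}
--
--     for s in strArr:
--         length = len(s)
--         if length not in length_groups:
--             length_groups[length] = []
--         length_groups[length].append(s)
--
--     # 가장 개수가 많은 그룹의 크기 찾기
--     max_group_size = 0
--     for length, group in length_groups.items():
--         max_group_size = max(max_group_size, len(group))
--
--     return max_group_size
-- ===== SOURCE B (Python) =====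
-- def solution(strArr):
--     lengths = sorted(len(s) for s in strArr)
--     max_run = 0
--     run = 0
--     prev = None
--     for L in lengths:
--         if prev == L:
--             run += 1
--         else:
--             run = 1
--             prev = L
--         max_run = max(max_run, run)
--     return max_run
-- ===== Notes on version B (the rewrite author's own statement) =====
-- stated objective: alternative
-- what changed: Replaces the dict-of-groups plus max-over-group-sizes with sorting the list of lengths and a single run-length scan that tracks the longest run of equal lengths.
import Mathlib
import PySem

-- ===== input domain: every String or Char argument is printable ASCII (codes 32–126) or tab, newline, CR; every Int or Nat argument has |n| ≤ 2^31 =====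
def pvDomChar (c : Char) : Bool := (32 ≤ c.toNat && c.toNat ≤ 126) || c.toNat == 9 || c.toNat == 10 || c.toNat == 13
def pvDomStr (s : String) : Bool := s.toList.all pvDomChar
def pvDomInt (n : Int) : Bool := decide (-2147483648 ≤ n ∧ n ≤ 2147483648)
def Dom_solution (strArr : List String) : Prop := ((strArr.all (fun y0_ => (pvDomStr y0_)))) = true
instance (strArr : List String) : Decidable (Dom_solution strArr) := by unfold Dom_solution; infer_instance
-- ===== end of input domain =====

-- B replaces A's dict-of-groups with sorting the lengths and one run-length scan (alternative algorithm, same result).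

-- ===== PORT A =====
def solution (strArr : List String) : Int :=
  let length_groups : PySem.Dict Int (List String) :=
    strArr.foldl (fun d s =>
      let length := PySem.Str.len s
      let d := if d.contains length then d else d.insert length ([] : List String)
      d.modify length [] (fun g => g ++ [s])) PySem.Dict.empty
  length_groups.items.foldl (fun m kv => max m ((kv.2.length : Int))) 0

-- ===== PORT B =====
def solution_alt (strArr : List String) : Int :=
  let lengths := PySem.List.sorted (strArr.map (fun s => PySem.Str.len s)) (fun x => x) false
  let st := lengths.foldl (fun (st : Int × Int × Option Int) L =>
      let maxRun := st.1
      let run := st.2.1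
      let prev := st.2.2
      let run' := if prev = some L then run + 1 else 1
      let prev' := if prev = some L then prev else some L
      (max maxRun run', run', prev')) (0, 0, none)
  st.1

-- ===== PRECONDITION & SPEC =====
def Spec_solution (strArr : List String) (out : Int) : Prop := out = solution_alt strArr
instance (strArr : List String) (out : Int) : Decidable (Spec_solution strArr out) := by unfold Spec_solution; infer_instance

-- ===== CLAIM (what is proved, stated in full; the proofs are below) =====
def Claim_equal_solution : Prop := ∀ (strArr : List String), Dom_solution strArr → Spec_solution strArr (solution strArr)

-- ===== LEMMAS AND PROOFS =====

-- maximal multiplicity of the list l, as a fold of max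
def cntmax (l : List Int) : Int := List.foldl max 0 (l.map (fun x => ((l.count x : Nat) : Int)))

-- foldl max basics
theorem le_foldl_max_init (l : List Int) (a : Int) : a ≤ List.foldl max a l := by
  induction l generalizing a with
  | nil => simp
  | cons x t ih => exact le_trans (le_max_left a x) (ih (max a x))

theorem le_foldl_max_mem (l : List Int) (a x : Int) (hx : x ∈ l) : x ≤ List.foldl max a l := by
  induction l generalizing a with
  | nil => simp at hx
  | cons y t ih =>
    rcases List.mem_cons.mp hx with h | h
    · subst h; exact le_trans (le_max_right a x) (le_foldl_max_init t _)
    · exact ih _ h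

theorem foldl_max_le (l : List Int) (a b : Int) (ha : a ≤ b) (h : ∀ x ∈ l, x ≤ b) :
    List.foldl max a l ≤ b := by
  induction l generalizing a with
  | nil => simpa using ha
  | cons y t ih =>
    exact ih _ (max_le ha (h y (by simp))) (fun x hx => h x (by simp [hx]))

theorem foldl_max_eq_of_same_mem (l1 l2 : List Int) (h : ∀ x, x ∈ l1 ↔ x ∈ l2) :
    List.foldl max 0 l1 = List.foldl max 0 l2 := by
  refine le_antisymm ?_ ?_
  · exact foldl_max_le _ _ _ (le_foldl_max_init _ _)
      (fun x hx => le_foldl_max_mem _ _ _ ((h x).mp hx))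
  · exact foldl_max_le _ _ _ (le_foldl_max_init _ _)
      (fun x hx => le_foldl_max_mem _ _ _ ((h x).mpr hx))

-- cntmax after appending one element
theorem mem_le_getLast (p : List Int) (hp : p.Pairwise (· ≤ ·)) (L : Int)
    (hl : p.getLast? = some L) : ∀ y ∈ p, y ≤ L := by
  induction p with
  | nil => simp at hl
  | cons a t ih =>
    rcases List.pairwise_cons.mp hp with ⟨ha, ht⟩
    cases t with
    | nil =>
      simp at hl; subst hl; intro y hy; simp at hy; subst hy; exact le_rfl
    | cons b u =>
      have hl' : (b :: u).getLast? = some L := by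
        simpa [List.getLast?_cons_cons] using hl
      intro y hy
      rcases List.mem_cons.mp hy with h | h
      · subst h
        exact le_trans (ha _ (List.mem_of_getLast? hl')) le_rfl
      · exact ih ht hl' y h

theorem cntmax_append (p : List Int) (x : Int) :
    cntmax (p ++ [x]) = max (cntmax p) (((p ++ [x]).count x : Nat) : Int) := by
  unfold cntmax
  refine le_antisymm ?_ (max_le ?_ ?_)
  · refine foldl_max_le _ _ _ (le_trans (le_foldl_max_init _ _) (le_max_left _ _)) ?_
    intro z hz
    rcases List.mem_map.mp hz with ⟨y, hy, rfl⟩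
    by_cases hyx : y = x
    · subst hyx; exact le_max_right _ _
    · have hyp : y ∈ p := by
        rcases List.mem_append.mp hy with h | h
        · exact h
        · simp at h; exact absurd h hyx
      have hxy : ¬ x = y := fun h => hyx h.symm
      have hcnt : (p ++ [x]).count y = p.count y := by
        simp [List.count_append, hxy]
      rw [hcnt]
      exact le_trans (le_foldl_max_mem _ _ _ (List.mem_map.mpr ⟨y, hyp, rfl⟩)) (le_max_left _ _)
  · refine foldl_max_le _ _ _ (le_foldl_max_init _ _) ?_
    intro z hz
    rcases List.mem_map.mp hz with ⟨y, hy, rfl⟩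
    have hle : (p.count y : Int) ≤ ((p ++ [x]).count y : Nat) := by
      have : p.count y ≤ (p ++ [x]).count y := by
        simp [List.count_append]
      exact_mod_cast this
    exact le_trans hle
      (le_foldl_max_mem _ _ _ (List.mem_map.mpr ⟨y, List.mem_append.mpr (Or.inl hy), rfl⟩))
  · exact le_foldl_max_mem _ _ _ (List.mem_map.mpr ⟨x, by simp, rfl⟩)

-- the run-length scan on a sorted list computes cntmax
def stepB : (Int × Int × Option Int) → Int → (Int × Int × Option Int) := fun st L =>
  let run' := if st.2.2 = some L then st.2.1 + 1 else 1
  let prev' := if st.2.2 = some L then st.2.2 else some L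
  (max st.1 run', run', prev')

theorem runscan (p : List Int) (hp : p.Pairwise (· ≤ ·)) :
    p.foldl stepB (0, 0, none) =
      (cntmax p,
       (match p.getLast? with | none => 0 | some L => ((p.count L : Nat) : Int)),
       p.getLast?) := by
  induction p using List.reverseRecOn with
  | nil => simp [cntmax]
  | append_singleton p x ih =>
    have hsplit := (List.pairwise_append.mp hp)
    have hp' : p.Pairwise (· ≤ ·) := hsplit.1
    have hx : ∀ y ∈ p, y ≤ x := fun y hy => hsplit.2.2 y hy x (by simp)
    rw [List.foldl_append, ih hp', List.getLast?_concat]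
    cases hlast : p.getLast? with
    | none =>
      have hpnil : p = [] := List.getLast?_eq_none_iff.mp hlast
      subst hpnil
      simp [stepB, cntmax]
    | some L =>
      by_cases hLx : L = x
      · subst hLx
        have hcnt : (p ++ [L]).count L = p.count L + 1 := by
          simp [List.count_append]
        simp only [List.foldl_cons, List.foldl_nil, stepB]
        rw [cntmax_append, hcnt]
        push_cast
        rfl
      · have hxp : x ∉ p := fun hmem =>
          hLx (le_antisymm (hx L (List.mem_of_getLast? hlast)) (mem_le_getLast p hp' L hlast x hmem))
        have hcnt : (p ++ [x]).count x = 1 := by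
          simp [List.count_append, List.count_eq_zero.mpr hxp]
        have hne : ¬ ((some L : Option Int) = some x) := by simp [hLx]
        simp only [List.foldl_cons, List.foldl_nil, stepB, if_neg hne]
        rw [cntmax_append, hcnt]
        push_cast
        rfl

-- A's grouping fold, characterized by getD and keys
def stepA : PySem.Dict Int (List String) → String → PySem.Dict Int (List String) := fun d s =>
  let length := PySem.Str.len s
  let d := if d.contains length then d else d.insert length ([] : List String)
  d.modify length [] (fun g => g ++ [s])

theorem A_fold (l : List String) (d : PySem.Dict Int (List String)) (hnd : d.keys.Nodup) :
    (l.foldl stepA d).keys.Nodup ∧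
    (∀ k, ((l.foldl stepA d).getD k []).length = (d.getD k []).length + (l.map PySem.Str.len).count k) ∧
    (∀ k, k ∈ (l.foldl stepA d).keys ↔ k ∈ d.keys ∨ k ∈ l.map PySem.Str.len) := by
  induction l generalizing d with
  | nil => exact ⟨hnd, by simp, by simp⟩
  | cons s t ih =>
    set L := PySem.Str.len s with hL
    -- one step of A's loop, characterized by getD and keys
    have hgetD : ∀ k, (stepA d s).getD k [] =
        if k = L then d.getD L [] ++ [s] else d.getD k [] := by
      intro k
      unfold stepA
      by_cases hc : d.contains L = true
      · simp only [← hL, hc, if_true]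
        rw [PySem.Dict.getD_modify]
      · have hcf : d.contains L = false := by simpa using hc
        simp only [← hL, hcf, Bool.false_eq_true, if_false]
        rw [PySem.Dict.getD_modify]
        by_cases hk : k = L
        · subst hk
          rw [if_pos rfl, if_pos rfl, PySem.Dict.getD_insert, if_pos rfl,
              PySem.Dict.getD_of_not_contains d [] hcf]
        · rw [if_neg hk, if_neg hk, PySem.Dict.getD_insert, if_neg hk]
    have hkeys : (stepA d s).keys = if d.contains L then d.keys else d.keys ++ [L] := by
      unfold stepA
      by_cases hc : d.contains L = true
      · simp only [← hL, hc, if_true]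
        rw [PySem.Dict.keys_modify, PySem.Dict.keys_insert_of_contains _ _ hc]
      · have hcf : d.contains L = false := by simpa using hc
        simp only [← hL, hcf, Bool.false_eq_true, if_false]
        rw [PySem.Dict.keys_modify,
            PySem.Dict.keys_insert_of_contains _ _ (PySem.Dict.contains_insert_self d L []),
            PySem.Dict.keys_insert_of_not_contains d [] hcf]
    have hnd' : (stepA d s).keys.Nodup := by
      rw [hkeys]
      by_cases hc : d.contains L = true
      · simpa [hc] using hnd
      · have hLn : L ∉ d.keys := fun hm =>
          hc ((PySem.Dict.contains_iff_mem_keys d L).mpr hm)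
        simp only [hc, Bool.false_eq_true, if_false]
        rw [List.nodup_append]
        refine ⟨hnd, by simp, ?_⟩
        intro a ha b hb
        rw [List.mem_singleton] at hb
        subst hb
        exact fun h => hLn (h ▸ ha)
    obtain ⟨h1, h2, h3⟩ := ih (stepA d s) hnd'
    refine ⟨by simpa using h1, ?_, ?_⟩
    · intro k
      have := h2 k
      rw [List.foldl_cons] at *
      rw [this, hgetD k]
      by_cases hk : k = L
      · subst hk
        simp only [List.map_cons, List.count_cons, ← hL]
        simp
        omega
      · have hLk : ¬ L = k := fun h => hk h.symm
        simp only [if_neg hk, List.map_cons, List.count_cons, ← hL]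
        simp [hLk]
    · intro k
      rw [List.foldl_cons, h3 k, hkeys]
      by_cases hc : d.contains L = true <;> by_cases hk : k = L
      · subst hk
        simp [hc, ← hL, (PySem.Dict.contains_iff_mem_keys d L).mp hc]
      · simp only [hc, if_true, List.map_cons, List.mem_cons, ← hL]
        tauto
      · subst hk
        simp [hc, ← hL]
        tauto
      · simp only [hc, Bool.false_eq_true, if_false, List.mem_append,
          List.mem_singleton, List.map_cons, List.mem_cons, ← hL]
        tauto

-- ===== VERDICT (by name: the statement is the Claim_ definition above) =====
theorem solution_spec : Claim_equal_solution := by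
  intro strArr _
  unfold Spec_solution
  -- the list of lengths
  set ls : List Int := strArr.map PySem.Str.len with hls
  -- B computes cntmax ls
  have hsp : (PySem.List.sorted ls (fun x => x) false).Pairwise (· ≤ ·) := by
    simpa using PySem.List.sorted_pairwise ls (fun x => x)
  have hperm : (PySem.List.sorted ls (fun x => x) false).Perm ls :=
    PySem.List.sorted_perm ls (fun x => x) false
  have hB : solution_alt strArr = cntmax (PySem.List.sorted ls (fun x => x) false) := by
    have h0 : solution_alt strArr =
        (List.foldl stepB (0, 0, none) (PySem.List.sorted ls (fun x => x) false)).1 := rfl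
    rw [h0, runscan _ hsp]
  have hBls : cntmax (PySem.List.sorted ls (fun x => x) false) = cntmax ls := by
    unfold cntmax
    apply foldl_max_eq_of_same_mem
    intro z
    simp only [List.mem_map]
    constructor
    · rintro ⟨y, hy, rfl⟩
      exact ⟨y, hperm.mem_iff.mp hy, by rw [hperm.count_eq]⟩
    · rintro ⟨y, hy, rfl⟩
      exact ⟨y, hperm.mem_iff.mpr hy, by rw [hperm.count_eq]⟩
  -- A computes cntmax ls
  obtain ⟨hnd, hcnt, hmem⟩ := A_fold strArr PySem.Dict.empty
    (by rw [PySem.Dict.keys_empty]; exact List.nodup_nil)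
  have hcnt' : ∀ k, ((strArr.foldl stepA PySem.Dict.empty).getD k []).length = ls.count k := by
    intro k; simpa [PySem.Dict.getD_empty] using hcnt k
  have hmem' : ∀ k, k ∈ (strArr.foldl stepA PySem.Dict.empty).keys ↔ k ∈ ls := by
    intro k
    rw [hls, hmem k, PySem.Dict.keys_empty]
    simp
  have hA : solution strArr =
      (strArr.foldl stepA PySem.Dict.empty).items.foldl (fun m kv => max m ((kv.2.length : Int))) 0 := rfl
  rw [hA, hB, hBls, PySem.Dict.items_eq_map_keys _ hnd [], List.foldl_map]
  have hform : (strArr.foldl stepA PySem.Dict.empty).keys.foldl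
        (fun m k => max m ((((strArr.foldl stepA PySem.Dict.empty).getD k []).length : Int))) 0
      = List.foldl max 0 ((strArr.foldl stepA PySem.Dict.empty).keys.map
          (fun k => ((((strArr.foldl stepA PySem.Dict.empty).getD k []).length : Int)))) := by
    rw [List.foldl_map]
  rw [hform]
  unfold cntmax
  apply foldl_max_eq_of_same_mem
  intro z
  simp only [List.mem_map]
  constructor
  · rintro ⟨k, hk, rfl⟩
    exact ⟨k, (hmem' k).mp hk, by rw [hcnt' k]⟩
  · rintro ⟨k, hk, rfl⟩
    exact ⟨k, (hmem' k).mpr hk, by rw [hcnt' k]⟩
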